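-- pv_equiv track=rewrite | github.com/DimitriosDiakoloukas/CodeJam2023FarewellRoundA | problem4.roundA.py | get_nth_letter
-- ===== SOURCE A (Python) =====
-- def get_nth_letter(n):
--     length = 0
--     rep = 1
--     while length + 26 * rep < n:
--         length += 26 * rep
--         rep += 1
--
--     position_in_repetition = (n - length - 1) // rep
--
--     letter_index = position_in_repetition % 26
--     return chr(ord('A') + letter_index)
-- ===== SOURCE B (Python) =====
-- def get_nth_letter(n):
--     # rep = smallest r >= 1 with 13*r*(r+1) >= n, found by doubling + binary search
--     hi = 1
--     while 13 * hi * (hi + 1) < n: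
--         hi *= 2
--     lo = 1
--     while lo < hi:
--         mid = (lo + hi) // 2
--         if 13 * mid * (mid + 1) < n:
--             lo = mid + 1
--         else:
--             hi = mid
--     rep = lo
--     length = 13 * rep * (rep - 1)
--     return chr(ord('A') + (n - length - 1) // rep % 26)
-- ===== Notes on version B (the rewrite author's own statement) =====
-- stated objective: faster
-- what changed: Replaces A's linear accumulation loop over repetition blocks by a doubling + binary search for the smallest repetition count whose cumulative block length reaches n, then computes the block offset in closed form.
import Mathlib
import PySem

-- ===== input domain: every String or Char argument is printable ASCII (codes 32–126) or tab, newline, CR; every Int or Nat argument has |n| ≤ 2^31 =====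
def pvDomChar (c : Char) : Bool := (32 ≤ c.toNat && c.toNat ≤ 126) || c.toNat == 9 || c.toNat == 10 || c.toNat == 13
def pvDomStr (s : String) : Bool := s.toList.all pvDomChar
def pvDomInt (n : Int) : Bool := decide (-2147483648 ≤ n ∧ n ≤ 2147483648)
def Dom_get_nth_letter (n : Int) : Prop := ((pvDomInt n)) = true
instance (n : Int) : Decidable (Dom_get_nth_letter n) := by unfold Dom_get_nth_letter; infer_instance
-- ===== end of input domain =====

-- B replaces A's linear block-accumulation loop by a doubling + binary search for the
-- repetition count; objective: faster (intended, fewer loop iterations), same output.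

-- ===== PORT A =====
-- A's while loop: length += 26*rep; rep += 1 while length + 26*rep < n.
-- The Nat fuel only makes the recursion structural; the lemmas below show the supplied
-- fuel is never exhausted, so the loop runs exactly as in Python.
def pvLoopA (n : Int) : Nat → Int → Int → Int × Int
  | 0, length, rep => (length, rep)
  | fuel + 1, length, rep =>
    if length + 26 * rep < n then pvLoopA n fuel (length + 26 * rep) (rep + 1)
    else (length, rep)

def get_nth_letter (n : Int) : String :=
  let p := pvLoopA n (n.toNat + 1) 0 1
  let position_in_repetition := PySem.Int.floordiv (n - p.1 - 1) p.2
  let letter_index := PySem.Int.mod position_in_repetition 26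
  String.ofList [Char.ofNat (65 + letter_index).toNat]

-- ===== PORT B =====
-- doubling loop of Source B: hi doubles while the cumulative length at hi is below n (fuel is a totality guard only)
def pvDouble (n : Int) : Nat → Int → Int
  | 0, hi => hi
  | fuel + 1, hi =>
    if 13 * hi * (hi + 1) < n then pvDouble n fuel (hi * 2) else hi

-- binary-search loop of Source B (fuel is a totality guard only)
def pvBsearch (n : Int) : Nat → Int → Int → Int
  | 0, lo, _ => lo
  | fuel + 1, lo, hi =>
    if lo < hi then
      let mid := PySem.Int.floordiv (lo + hi) 2
      if 13 * mid * (mid + 1) < n then pvBsearch n fuel (mid + 1) hi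
      else pvBsearch n fuel lo mid
    else lo

def get_nth_letter_alt (n : Int) : String :=
  let hi := pvDouble n (n.toNat + 1) 1
  let rep := pvBsearch n ((hi - 1).toNat + 1) 1 hi
  let length := 13 * rep * (rep - 1)
  String.ofList [Char.ofNat (65 + PySem.Int.mod (PySem.Int.floordiv (n - length - 1) rep) 26).toNat]

-- ===== PRECONDITION & SPEC =====
def Spec_get_nth_letter (n : Int) (out : String) : Prop := out = get_nth_letter_alt n
instance (n : Int) (out : String) : Decidable (Spec_get_nth_letter n out) := by unfold Spec_get_nth_letter; infer_instance

-- ===== CLAIM (what is proved, stated in full; the proofs are below) =====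
def Claim_equal_get_nth_letter : Prop := ∀ (n : Int), Dom_get_nth_letter n → Spec_get_nth_letter n (get_nth_letter n)

-- ===== LEMMAS AND PROOFS =====

-- r is THE repetition count for n: the smallest r ≥ 1 whose cumulative block length reaches n.
def pvGood (n r : Int) : Prop := 1 ≤ r ∧ n ≤ 13 * r * (r + 1) ∧ (r = 1 ∨ 13 * (r - 1) * r < n)

lemma pvGood_unique (n r s : Int) (hr : pvGood n r) (hs : pvGood n s) : r = s := by
  obtain ⟨hr1, hr2, hr3⟩ := hr
  obtain ⟨hs1, hs2, hs3⟩ := hs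
  by_contra hne
  rcases lt_or_gt_of_ne hne with h | h
  · rcases hs3 with rfl | hs3
    · omega
    · nlinarith
  · rcases hr3 with rfl | hr3
    · omega
    · nlinarith

lemma loopA_good (n : Int) (fuel : Nat) : ∀ (length rep : Int),
    1 ≤ rep → (rep = 1 ∨ 13 * (rep - 1) * rep < n) → length = 13 * rep * (rep - 1) →
    (n - length - 26 * rep).toNat < fuel →
    pvGood n (pvLoopA n fuel length rep).2 ∧
      (pvLoopA n fuel length rep).1 =
        13 * (pvLoopA n fuel length rep).2 * ((pvLoopA n fuel length rep).2 - 1) := by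
  induction fuel with
  | zero => intro length rep _ _ _ hf; omega
  | succ fuel ih =>
    intro length rep h1 h2 h3 hf
    simp only [pvLoopA]
    split
    · rename_i hcond
      exact ih _ _ (by omega) (by right; nlinarith) (by nlinarith) (by omega)
    · rename_i hcond
      exact ⟨⟨h1, by nlinarith, h2⟩, h3⟩

lemma double_good (n : Int) (fuel : Nat) : ∀ (hi : Int),
    1 ≤ hi → (n - 13 * hi * (hi + 1)).toNat < fuel →
    1 ≤ pvDouble n fuel hi ∧ n ≤ 13 * pvDouble n fuel hi * (pvDouble n fuel hi + 1) := by
  induction fuel with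
  | zero => intro hi _ hf; omega
  | succ fuel ih =>
    intro hi h1 hf
    simp only [pvDouble]
    split
    · rename_i hcond
      have hgrow : 13 * hi * (hi + 1) + 52 ≤ 13 * (hi * 2) * (hi * 2 + 1) := by nlinarith
      exact ih _ (by omega) (by omega)
    · rename_i hcond
      exact ⟨h1, by omega⟩

lemma bsearch_good (n : Int) (fuel : Nat) : ∀ (lo hi : Int),
    1 ≤ lo → lo ≤ hi → n ≤ 13 * hi * (hi + 1) → (lo = 1 ∨ 13 * (lo - 1) * lo < n) →
    (hi - lo).toNat < fuel →
    pvGood n (pvBsearch n fuel lo hi) := by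
  induction fuel with
  | zero => intro lo hi _ _ _ _ hf; omega
  | succ fuel ih =>
    intro lo hi h1 hle hhi hlo hf
    simp only [pvBsearch]
    split
    · rename_i hlt
      have hm : PySem.Int.floordiv (lo + hi) 2 = (lo + hi) / 2 :=
        PySem.Int.floordiv_eq_ediv_of_pos (by omega)
      rw [hm]
      split
      · rename_i hcond
        refine ih _ _ (by omega) (by omega) hhi ?_ (by omega)
        right
        have h' : (lo + hi) / 2 + 1 - 1 = (lo + hi) / 2 := by omega
        rw [h']
        exact hcond
      · rename_i hcond
        exact ih _ _ h1 (by omega) (by omega) hlo (by omega)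
    · rename_i hlt
      have : lo = hi := by omega
      subst this
      exact ⟨h1, hhi, hlo⟩

-- ===== VERDICT (by name: the statement is the Claim_ definition above) =====
theorem get_nth_letter_spec : Claim_equal_get_nth_letter := by
  intro n _
  unfold Spec_get_nth_letter get_nth_letter get_nth_letter_alt
  obtain ⟨hga, hlenA⟩ :=
    loopA_good n (n.toNat + 1) 0 1 (by omega) (Or.inl rfl) (by ring) (by omega)
  have hd := double_good n (n.toNat + 1) 1 (by omega) (by omega)
  have hgb := bsearch_good n ((pvDouble n (n.toNat + 1) 1 - 1).toNat + 1) 1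
    (pvDouble n (n.toNat + 1) 1) (by omega) hd.1 hd.2 (Or.inl rfl) (by omega)
  have hrep := pvGood_unique n _ _ hga hgb
  simp only [← hrep, hlenA]
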